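-- pv_equiv track=rewrite | github.com/sebstemmer/shoot-a-cbow | v3/preprocessing/preprocessing_utils.py | create_bag_of_words
-- ===== SOURCE A (Python) =====
-- def create_bag_of_words(
--         word_idx_in_sentence: int,
--         sentence_in_words: list[str],
--         context_window_size: int
-- ) -> list[str]:
--     return [
--         sentence_in_words[idx_in_sentence] for idx_in_sentence in range(
--             word_idx_in_sentence-context_window_size,
--             word_idx_in_sentence+context_window_size + 1
--         ) if (idx_in_sentence >= 0 and idx_in_sentence < len(sentence_in_words) and idx_in_sentence != word_idx_in_sentence)
--     ]
-- ===== SOURCE B (Python) =====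
-- def create_bag_of_words(
--         word_idx_in_sentence: int,
--         sentence_in_words: list[str],
--         context_window_size: int
-- ) -> list[str]:
--     n = len(sentence_in_words)
--     lower = min(max(word_idx_in_sentence - context_window_size, 0), n)
--     upper = min(max(word_idx_in_sentence + context_window_size + 1, 0), n)
--     if lower <= word_idx_in_sentence < upper:
--         return (sentence_in_words[lower:word_idx_in_sentence]
--                 + sentence_in_words[word_idx_in_sentence + 1:upper])
--     return sentence_in_words[lower:upper]
-- ===== Notes on version B (the rewrite author's own statement) =====
-- stated objective: simpler
-- what changed: Replaces the per-index filtered range comprehension with arithmetic clamping of the window bounds and one or two list slices concatenated.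
import Mathlib
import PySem

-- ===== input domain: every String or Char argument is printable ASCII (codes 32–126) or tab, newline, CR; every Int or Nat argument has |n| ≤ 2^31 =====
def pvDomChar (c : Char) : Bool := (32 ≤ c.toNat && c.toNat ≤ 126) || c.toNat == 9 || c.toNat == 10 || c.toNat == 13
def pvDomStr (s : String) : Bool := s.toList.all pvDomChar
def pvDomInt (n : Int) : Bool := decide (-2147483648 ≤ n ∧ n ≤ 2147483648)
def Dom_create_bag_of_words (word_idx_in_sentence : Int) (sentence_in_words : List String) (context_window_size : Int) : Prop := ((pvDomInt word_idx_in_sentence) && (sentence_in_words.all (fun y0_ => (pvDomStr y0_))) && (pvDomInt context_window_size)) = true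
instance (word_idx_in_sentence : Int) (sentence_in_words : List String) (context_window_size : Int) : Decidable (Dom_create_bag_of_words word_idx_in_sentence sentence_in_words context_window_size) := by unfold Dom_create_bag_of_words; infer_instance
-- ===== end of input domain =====

-- B replaces A's per-index filtered range comprehension by clamped window bounds and slice concatenation (objective: simpler).

-- ===== PORT A =====
-- the filter guarantees 0 ≤ i < len, so pyGetD (Python's s[i] with a default never used) is exact
def create_bag_of_words (word_idx_in_sentence : Int) (sentence_in_words : List String) (context_window_size : Int) : List String :=
  ((PySem.List.pyRange (word_idx_in_sentence - context_window_size) (word_idx_in_sentence + context_window_size + 1) 1).filter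
      (fun i => decide (0 ≤ i) && decide (i < (sentence_in_words.length : Int)) && decide (i ≠ word_idx_in_sentence))).map
    (fun i => PySem.List.pyGetD sentence_in_words i "")

-- ===== PORT B =====
def create_bag_of_words_alt (word_idx_in_sentence : Int) (sentence_in_words : List String) (context_window_size : Int) : List String :=
  let n : Int := sentence_in_words.length
  let lower := min (max (word_idx_in_sentence - context_window_size) 0) n
  let upper := min (max (word_idx_in_sentence + context_window_size + 1) 0) n
  if lower ≤ word_idx_in_sentence ∧ word_idx_in_sentence < upper then
    PySem.List.slice sentence_in_words (some lower) (some word_idx_in_sentence) ++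
      PySem.List.slice sentence_in_words (some (word_idx_in_sentence + 1)) (some upper)
  else
    PySem.List.slice sentence_in_words (some lower) (some upper)

-- ===== PRECONDITION & SPEC =====
def Spec_create_bag_of_words (word_idx_in_sentence : Int) (sentence_in_words : List String) (context_window_size : Int) (out : List String) : Prop := out = create_bag_of_words_alt word_idx_in_sentence sentence_in_words context_window_size
instance (word_idx_in_sentence : Int) (sentence_in_words : List String) (context_window_size : Int) (out : List String) : Decidable (Spec_create_bag_of_words word_idx_in_sentence sentence_in_words context_window_size out) := by unfold Spec_create_bag_of_words; infer_instance

-- ===== CLAIM (what is proved, stated in full; the proofs are below) =====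
def Claim_equal_create_bag_of_words : Prop := ∀ (word_idx_in_sentence : Int) (sentence_in_words : List String) (context_window_size : Int), Dom_create_bag_of_words word_idx_in_sentence sentence_in_words context_window_size → Spec_create_bag_of_words word_idx_in_sentence sentence_in_words context_window_size (create_bag_of_words word_idx_in_sentence sentence_in_words context_window_size)

-- ===== LEMMAS AND PROOFS =====

-- two strictly increasing Int lists with the same members are equal
theorem pv_eq_of_mem_pairwise_lt {l₁ l₂ : List Int}
    (h₁ : l₁.Pairwise (· < ·)) (h₂ : l₂.Pairwise (· < ·))
    (hm : ∀ x, x ∈ l₁ ↔ x ∈ l₂) : l₁ = l₂ := by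
  have n₁ : l₁.Nodup := h₁.imp ne_of_lt
  have n₂ : l₂.Nodup := h₂.imp ne_of_lt
  have hp : l₁.Perm l₂ := (List.perm_ext_iff_of_nodup n₁ n₂).mpr hm
  exact hp.eq_of_pairwise (fun a b _ _ hab hba => absurd hba (not_lt.mpr hab.le)) h₁ h₂

-- mapping s[i] over pyRange lo hi is the slice s[lo:hi], for 0 ≤ lo and hi ≤ len s
theorem pv_map_pyGetD_range (s : List String) (lo hi : Int)
    (h0 : 0 ≤ lo) (hn : hi ≤ (s.length : Int)) :
    (PySem.List.pyRange lo hi 1).map (fun i => PySem.List.pyGetD s i "")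
      = (s.drop lo.toNat).take (hi.toNat - lo.toNat) := by
  by_cases hlt : lo < hi
  · rw [PySem.List.pyRange_one_cons hlt, List.map_cons]
    have hlen : lo.toNat < s.length := by omega
    have hd : s.drop lo.toNat = s[lo.toNat] :: s.drop (lo.toNat + 1) :=
      List.drop_eq_getElem_cons hlen
    have hget : PySem.List.pyGetD s lo "" = s[lo.toNat] :=
      PySem.List.pyGetD_eq_getElem s "" h0 (by omega)
    have ih := pv_map_pyGetD_range s (lo + 1) hi (by omega) hn
    rw [hget, ih, hd]
    have h1 : (lo + 1).toNat = lo.toNat + 1 := by omega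
    have h2 : hi.toNat - lo.toNat = (hi.toNat - (lo.toNat + 1)) + 1 := by omega
    rw [h1, h2, List.take_succ_cons]
  · rw [PySem.List.pyRange_one_eq_nil (by omega), List.map_nil]
    have : hi.toNat - lo.toNat = 0 := by omega
    rw [this, List.take_zero]
termination_by (hi - lo).toNat
decreasing_by omega

theorem create_bag_of_words_eq (w : Int) (s : List String) (c : Int) :
    create_bag_of_words w s c = create_bag_of_words_alt w s c := by
  unfold create_bag_of_words create_bag_of_words_alt
  simp only []
  set n : Int := (s.length : Int) with hn
  have hn0 : 0 ≤ n := by positivity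
  set L : Int := min (max (w - c) 0) n with hL
  set U : Int := min (max (w + c + 1) 0) n with hU
  have hfiltP : ∀ (a b : Int),
      ((PySem.List.pyRange a b 1).filter
        (fun i => decide (0 ≤ i) && decide (i < n) && decide (i ≠ w))).Pairwise (· < ·) :=
    fun a b => (PySem.List.pairwise_lt_pyRange_one a b).sublist List.filter_sublist
  have hmemFilt : ∀ (x a b : Int),
      x ∈ (PySem.List.pyRange a b 1).filter
        (fun i => decide (0 ≤ i) && decide (i < n) && decide (i ≠ w))
        ↔ (a ≤ x ∧ x < b ∧ 0 ≤ x ∧ x < n ∧ x ≠ w) := by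
    intro x a b
    simp [List.mem_filter, PySem.List.mem_pyRange_one]
    tauto
  by_cases hg : L ≤ w ∧ w < U
  · -- the focus word lies inside the clamped window
    rw [if_pos hg]
    have hw0 : 0 ≤ w := le_trans (by omega) hg.1
    have hwn : w < n := by omega
    have hrange : (PySem.List.pyRange (w - c) (w + c + 1) 1).filter
        (fun i => decide (0 ≤ i) && decide (i < n) && decide (i ≠ w))
        = PySem.List.pyRange L w 1 ++ PySem.List.pyRange (w + 1) U 1 := by
      apply pv_eq_of_mem_pairwise_lt (hfiltP _ _)
      · rw [List.pairwise_append]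
        refine ⟨PySem.List.pairwise_lt_pyRange_one _ _, PySem.List.pairwise_lt_pyRange_one _ _, ?_⟩
        intro x hx y hy
        rw [PySem.List.mem_pyRange_one] at hx hy
        omega
      · intro x
        rw [hmemFilt, List.mem_append, PySem.List.mem_pyRange_one, PySem.List.mem_pyRange_one]
        omega
    rw [hrange, List.map_append,
      pv_map_pyGetD_range s L w (by omega) (by omega),
      pv_map_pyGetD_range s (w + 1) U (by omega) (by omega),
      PySem.List.slice_toNat s (by omega) hw0,
      PySem.List.slice_toNat s (by omega : (0:Int) ≤ w + 1) (by omega)]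
  · -- the focus word is outside the clamped window: pure clamped slice
    rw [if_neg hg]
    have hrange : (PySem.List.pyRange (w - c) (w + c + 1) 1).filter
        (fun i => decide (0 ≤ i) && decide (i < n) && decide (i ≠ w))
        = PySem.List.pyRange L U 1 := by
      apply pv_eq_of_mem_pairwise_lt (hfiltP _ _) (PySem.List.pairwise_lt_pyRange_one _ _)
      intro x
      rw [hmemFilt, PySem.List.mem_pyRange_one]
      omega
    rw [hrange, pv_map_pyGetD_range s L U (by omega) (by omega),
      PySem.List.slice_toNat s (by omega) (by omega)]

-- ===== VERDICT (by name: the statement is the Claim_ definition above) =====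
theorem create_bag_of_words_spec : Claim_equal_create_bag_of_words := by
  intro w s c _
  unfold Spec_create_bag_of_words
  exact create_bag_of_words_eq w s c
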